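-- pv_equiv track=rewrite | github.com/Sajid576/problem-solving-in-python | interview/amazon_1.py | solve
-- ===== SOURCE A (Python) =====
-- from typing import List
--
-- def solve(N: int, a: int, x: List[int]) -> int:
--     largest = second = -2454635434
--     largest_indx = -1
--     # Find the largest element
--     for i in range(0, N):
--         if(largest < x[i]):
--             largest = x[i]
--             largest_indx = i
--
--     # Find the second largest element
--     for i in range(0, N):
--         if(second < x[i] and i != largest_indx):
--             second = x[i]
--
--     return abs(largest-a)+abs(second-a)
-- ===== SOURCE B (Python) =====
-- def solve(N, a, x):
--     sentinel = -2454635434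
--     m1 = m2 = sentinel
--     for v in x[:max(N, 0)]:
--         if v > m1:
--             m1, m2 = v, m1
--         elif v > m2:
--             m2 = v
--     return abs(m1 - a) + abs(m2 - a)
-- ===== Notes on version B (the rewrite author's own statement) =====
-- stated objective: simpler
-- what changed: Replaces A's two index-driven scans (find the max and its index, then rescan skipping that index) with a single pass that maintains the top-two pair (m1, m2), eliminating the index bookkeeping.
import Mathlib
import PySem

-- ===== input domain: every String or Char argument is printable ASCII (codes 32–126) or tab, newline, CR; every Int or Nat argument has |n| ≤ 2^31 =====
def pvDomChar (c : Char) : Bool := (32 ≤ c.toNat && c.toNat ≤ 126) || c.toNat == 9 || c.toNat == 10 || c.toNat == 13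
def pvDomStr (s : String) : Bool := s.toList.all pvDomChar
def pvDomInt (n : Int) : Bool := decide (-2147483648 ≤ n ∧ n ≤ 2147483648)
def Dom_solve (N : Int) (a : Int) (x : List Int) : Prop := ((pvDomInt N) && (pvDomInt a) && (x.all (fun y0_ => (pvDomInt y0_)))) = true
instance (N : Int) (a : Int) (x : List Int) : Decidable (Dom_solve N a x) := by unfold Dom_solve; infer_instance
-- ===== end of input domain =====

-- B replaces A's two index-driven scans (largest, then second-largest skipping the
-- stored index) by one pass that maintains the top-two pair; simpler, no index bookkeeping.

-- ===== PORT A =====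
-- step of A's first loop: state (largest, largest_indx)
def stepA1 (st : Int × Int) (iv : Int × Int) : Int × Int :=
  if st.1 < iv.2 then (iv.2, iv.1) else st

-- step of A's second loop with the fixed largest_indx j: state second
def stepA2 (j : Int) (st : Int) (iv : Int × Int) : Int :=
  if st < iv.2 ∧ iv.1 ≠ j then iv.2 else st

def solve (N : Int) (a : Int) (x : List Int) : Int :=
  let s1 := (PySem.List.pyRange 0 N 1).foldl
      (fun st i => stepA1 st (i, PySem.List.pyGetD x i 0)) (-2454635434, -1)
  let second := (PySem.List.pyRange 0 N 1).foldl
      (fun st i => stepA2 s1.2 st (i, PySem.List.pyGetD x i 0)) (-2454635434)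
  |s1.1 - a| + |second - a|

-- ===== PORT B =====
-- step of B's single loop: state (m1, m2) = top two so far
def stepB (st : Int × Int) (v : Int) : Int × Int :=
  if v > st.1 then (v, st.1) else if v > st.2 then (st.1, v) else st

def solve_alt (N : Int) (a : Int) (x : List Int) : Int :=
  let p := (PySem.List.slice x none (some (max N 0))).foldl stepB (-2454635434, -2454635434)
  |p.1 - a| + |p.2 - a|

-- ===== PRECONDITION & SPEC =====
-- A raises IndexError (x[i]) exactly when N > len(x); those inputs are excluded, nothing else.
def Pre_solve (N : Int) (a : Int) (x : List Int) : Prop := N ≤ PySem.List.len x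
instance (N : Int) (a : Int) (x : List Int) : Decidable (Pre_solve N a x) := by unfold Pre_solve; infer_instance
def pvWitness_solve : Int × Int × List Int := (3, 2, [5, 1, 5])

def Spec_solve (N : Int) (a : Int) (x : List Int) (out : Int) : Prop := out = solve_alt N a x
instance (N : Int) (a : Int) (x : List Int) (out : Int) : Decidable (Spec_solve N a x out) := by unfold Spec_solve; infer_instance

-- ===== CLAIM (what is proved, stated in full; the proofs are below) =====
def Claim_equal_solve : Prop := ∀ (N : Int) (a : Int) (x : List Int), Dom_solve N a x → Pre_solve N a x → Spec_solve N a x (solve N a x)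

-- ===== LEMMAS AND PROOFS =====

-- B's running first component is the plain running maximum.
lemma fst_foldl_stepB (t : List Int) : ∀ m1 m2 : Int,
    (t.foldl stepB (m1, m2)).1 = t.foldl max m1 := by
  induction t with
  | nil => intro _ _; rfl
  | cons v t ih =>
      intro m1 m2
      simp only [List.foldl_cons, stepB]
      split_ifs with h1 h2 <;>
        simp [ih, show max m1 v = if v > m1 then v else m1 by split_ifs <;> omega] <;>
        split_ifs <;> omega

-- A's second pass with an index that never occurs is the plain running maximum of the values.
lemma foldl_stepA2_noexcl (p : List (Int × Int)) : ∀ (j s : Int),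
    (∀ iv ∈ p, iv.1 ≠ j) → p.foldl (stepA2 j) s = p.foldl (fun s iv => max s iv.2) s := by
  induction p with
  | nil => intro _ _ _; rfl
  | cons iv p ih =>
      intro j s h
      simp only [List.foldl_cons, stepA2]
      have hne : iv.1 ≠ j := h iv (by simp)
      rw [ih j _ (fun w hw => h w (by simp [hw]))]
      congr 1
      split_ifs with h1 <;> simp at h1 <;> omega

-- max of the values of an enumerate fold.
lemma foldl_max_enum (t : List Int) (s : Int) :
    (PySem.List.enumerate t 0).foldl (fun s iv => max s iv.2) s = t.foldl max s := by
  conv_rhs => rw [← PySem.List.map_snd_enumerate t 0]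
  rw [List.foldl_map]

-- every index produced by enumerate t 0 is < t.length
lemma enum_fst_lt (t : List Int) (iv : Int × Int) (h : iv ∈ PySem.List.enumerate t 0) :
    iv.1 < (t.length : Int) := by
  have : iv.1 ∈ (PySem.List.enumerate t 0).map (·.1) := List.mem_map_of_mem h
  rw [PySem.List.map_fst_enumerate] at this
  have := (PySem.List.mem_pyRange_one.mp this).2
  omega

-- MAIN INVARIANT: over any processed list, A's two passes compute exactly B's pair,
-- and A's stored index stays below the length.
lemma pv_main (t : List Int) :
    ((PySem.List.enumerate t 0).foldl stepA1 (-2454635434, -1)).1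
        = (t.foldl stepB (-2454635434, -2454635434)).1
  ∧ ((PySem.List.enumerate t 0).foldl stepA1 (-2454635434, -1)).2 < (t.length : Int)
  ∧ (PySem.List.enumerate t 0).foldl
        (stepA2 ((PySem.List.enumerate t 0).foldl stepA1 (-2454635434, -1)).2) (-2454635434)
        = (t.foldl stepB (-2454635434, -2454635434)).2 := by
  induction t using List.reverseRecOn with
  | nil => refine ⟨rfl, by simp [PySem.List.enumerate], rfl⟩
  | append_singleton t v ih =>
      obtain ⟨ih1, ih2, ih3⟩ := ih
      have henum : PySem.List.enumerate (t ++ [v]) 0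
          = PySem.List.enumerate t 0 ++ [((t.length : Int), v)] := by
        rw [PySem.List.enumerate_append]
        simp [PySem.List.enumerate]
      set A1 := (PySem.List.enumerate t 0).foldl stepA1 (-2454635434, -1) with hA1
      set B := t.foldl stepB (-2454635434, -2454635434) with hB
      rw [henum]
      simp only [List.foldl_append, List.foldl_cons, List.foldl_nil]
      by_cases hc : A1.1 < v
      · -- new maximum: A's index becomes t.length, the step of the second pass is skipped
        have hstep : stepA1 A1 ((t.length : Int), v) = (v, (t.length : Int)) := by
          simp [stepA1, hc]
        rw [← hA1, ← hB, hstep]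
        refine ⟨?_, ?_, ?_⟩
        · simp only [stepB]
          rw [if_pos (by omega : v > B.1)]
        · simp only [List.length_append, List.length_cons, List.length_nil]
          push_cast; omega
        · have hne : ∀ iv ∈ PySem.List.enumerate t 0, iv.1 ≠ ((t.length : Int)) :=
            fun iv h => ne_of_lt (enum_fst_lt t iv h)
          simp only []
          rw [foldl_stepA2_noexcl _ _ _ hne, foldl_max_enum]
          simp only [stepA2]
          rw [if_neg (by simp)]
          simp only [stepB]
          rw [if_pos (by omega : v > B.1), hB, fst_foldl_stepB]
      · -- not a new maximum: A's pair is unchanged, the second pass takes one real step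
        have hstep : stepA1 A1 ((t.length : Int), v) = A1 := by
          simp [stepA1, hc]
        rw [← hA1, ← hB, hstep]
        refine ⟨?_, ?_, ?_⟩
        · simp only [stepB]
          split_ifs with h1 h2 <;> simp_all <;> omega
        · simp only [List.length_append, List.length_cons, List.length_nil]
          push_cast; omega
        · rw [ih3]
          simp only [stepA2, stepB]
          split_ifs <;> simp_all <;> omega

-- convert A's loop over range(0, n) indexing x to a loop over enumerate (x.take n)
lemma range_to_enum {σ : Type} (x : List Int) (n : Nat) (h : n ≤ x.length)
    (g : σ → Int × Int → σ) (init : σ) :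
    (PySem.List.pyRange 0 (n : Int) 1).foldl
        (fun st i => g st (i, PySem.List.pyGetD x i 0)) init
      = (PySem.List.enumerate (x.take n) 0).foldl g init := by
  rw [PySem.List.enumerate_eq_map_pyRange (x.take n) 0, List.foldl_map]
  have hlen : PySem.List.len (x.take n) = (n : Int) := by
    simp [PySem.List.len_eq]; omega
  rw [hlen]
  refine PySem.List.foldl_congr_mem _ _ _ _ ?_
  intro acc i hi
  obtain ⟨h0, h1⟩ := PySem.List.mem_pyRange_one.mp hi
  rw [PySem.List.pyGetD_eq_getElem x 0 h0 (by omega),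
      PySem.List.pyGetD_eq_getElem (x.take n) 0 h0 (by simp; omega),
      List.getElem_take]

-- ===== VERDICT (by name: the statement is the Claim_ definition above) =====
theorem solve_spec : Claim_equal_solve := by
  unfold Claim_equal_solve Spec_solve Pre_solve
  intro N a x _ hpre
  rw [PySem.List.len_eq] at hpre
  simp only [solve, solve_alt]
  by_cases hN : N ≤ 0
  · have h0 : max N 0 = 0 := by omega
    rw [PySem.List.pyRange_one_eq_nil hN, h0, PySem.List.slice_to x (show (0:Int) ≤ 0 by omega)]
    simp
  · push Not at hN
    have hmax : max N 0 = N := by omega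
    have hn : N = ((N.toNat : Nat) : Int) := by omega
    rw [hmax, hn, PySem.List.slice_to_natCast,
        range_to_enum x N.toNat (by omega) stepA1 _,
        range_to_enum x N.toNat (by omega)
          (stepA2 ((PySem.List.enumerate (x.take N.toNat) 0).foldl stepA1 (-2454635434, -1)).2) _]
    obtain ⟨h1, _, h3⟩ := pv_main (x.take N.toNat)
    rw [h1, h3]
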